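-- pv_equiv track=rewrite | github.com/TPhong972005/CuoiKy | 21_30.py | question_26
-- ===== SOURCE A (Python) =====
-- import collections
--
-- def question_26(s: str) -> int:
--     demchuoi= collections.Counter(s)
--     length= 0
--     for count in demchuoi.values():
--         length += count // 2 * 2
--         if count % 2 == 1:
--             length += 1
--     return length
-- ===== SOURCE B (Python) =====
-- def question_26(s: str) -> int:
--     # Every character count contributes count//2*2 plus 1 if odd, i.e. count itself,
--     # so the whole loop just re-computes the length of s.
--     return len(s)
-- ===== Notes on version B (the rewrite author's own statement) =====
-- stated objective: simpler
-- what changed: A builds a Counter and sums each count's even part plus one per odd count, which is arithmetically the count itself; B replaces the whole aggregation with the closed form len(s).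
import Mathlib
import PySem

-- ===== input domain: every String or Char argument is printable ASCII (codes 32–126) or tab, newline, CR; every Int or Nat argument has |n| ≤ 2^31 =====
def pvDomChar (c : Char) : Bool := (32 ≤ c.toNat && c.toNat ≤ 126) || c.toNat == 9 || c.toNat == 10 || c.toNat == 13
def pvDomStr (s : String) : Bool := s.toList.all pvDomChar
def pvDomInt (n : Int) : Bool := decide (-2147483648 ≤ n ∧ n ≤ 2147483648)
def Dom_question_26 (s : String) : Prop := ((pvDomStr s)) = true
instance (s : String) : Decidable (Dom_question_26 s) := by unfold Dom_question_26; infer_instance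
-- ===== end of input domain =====

-- B replaces A's Counter aggregation (even part + 1 per odd count = the count) by the closed form len(s).

-- ===== PORT A =====
def question_26 (s : String) : Int :=
  let demchuoi := PySem.Dict.counter s.toList
  demchuoi.values.foldl
    (fun length count =>
      let length := length + PySem.Int.floordiv count 2 * 2
      if PySem.Int.mod count 2 == 1 then length + 1 else length) 0

-- ===== PORT B =====
def question_26_alt (s : String) : Int :=
  PySem.Str.len s

-- ===== PRECONDITION & SPEC =====
def Spec_question_26 (s : String) (out : Int) : Prop := out = question_26_alt s
instance (s : String) (out : Int) : Decidable (Spec_question_26 s out) := by unfold Spec_question_26; infer_instance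

-- ===== CLAIM (what is proved, stated in full; the proofs are below) =====
def Claim_equal_question_26 : Prop := ∀ (s : String), Dom_question_26 s → Spec_question_26 s (question_26 s)

-- ===== LEMMAS AND PROOFS =====

-- each loop step adds exactly the count
lemma pv_step_eq (a c : Int) :
    (if PySem.Int.mod c 2 == 1 then a + PySem.Int.floordiv c 2 * 2 + 1
     else a + PySem.Int.floordiv c 2 * 2) = a + c := by
  have h := PySem.Int.floordiv_mul_add_mod c 2
  have h2 := PySem.Int.mod_two_eq c
  rcases h2 with h2 | h2 <;> simp only [h2] <;> simp <;> omega

lemma pv_foldl_eq_sum (l : List Int) (a : Int) :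
    l.foldl (fun length count =>
      let length := length + PySem.Int.floordiv count 2 * 2
      if PySem.Int.mod count 2 == 1 then length + 1 else length) a = a + l.sum := by
  induction l generalizing a with
  | nil => simp
  | cons c t ih =>
    simp only [List.foldl_cons, List.sum_cons]
    rw [show (let length := a + PySem.Int.floordiv c 2 * 2;
        if PySem.Int.mod c 2 == 1 then length + 1 else length) = a + c from pv_step_eq a c, ih]
    ring

lemma pv_sum_counts (xs : List Char) :
    ((PySem.Set.ofList xs).map (fun k => (xs.count k : Int))).sum = (xs.length : Int) := by
  have hperm : (PySem.Set.ofList xs).Perm xs.dedup := by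
    rw [List.perm_ext_iff_of_nodup (PySem.Set.nodup_ofList xs) xs.nodup_dedup]
    intro a
    rw [PySem.Set.mem_ofList, List.mem_dedup]
  have := (hperm.map (fun k => (xs.count k : Int))).sum_eq
  rw [this]
  have h : (xs.dedup.map fun x => xs.count x).sum = xs.length :=
    List.sum_map_count_dedup_eq_length xs
  rw [← h]
  push_cast
  rw [List.map_map]
  rfl

-- ===== VERDICT (by name: the statement is the Claim_ definition above) =====
theorem question_26_spec : Claim_equal_question_26 := by
  intro s _
  unfold Spec_question_26 question_26 question_26_alt
  simp only []
  have hv : (PySem.Dict.counter s.toList).values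
      = (PySem.Set.ofList s.toList).map (fun k => (s.toList.count k : Int)) := by
    simp [PySem.Dict.values, PySem.Dict.items_counter, List.map_map, Function.comp]
  rw [hv, pv_foldl_eq_sum, pv_sum_counts, PySem.Str.len_eq]
  simp
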